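-- pv_equiv track=rewrite | github.com/Knogle/mount-loop | mount-loop.py | normalize_legacy_argv
-- ===== SOURCE A (Python) =====
-- def normalize_legacy_argv(argv: list[str]) -> list[str]:
--     if not argv:
--         return argv
--
--     global_args: list[str] = []
--     rest = list(argv)
--     while rest and rest[0] in {"--script", "--keep", "--help", "-h"}:
--         global_args.append(rest.pop(0))
--
--     if not rest:
--         return global_args
--
--     if rest[0] in {"attach", "create"}:
--         return global_args + rest
--
--     cmd = rest[0]
--
--     if cmd == "automount" and len(rest) == 2:
--         return global_args + ["create", "--size", rest[1]]
--     if cmd == "automountfs" and len(rest) == 2: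
--         return global_args + ["create", "--size", rest[1], "--fs"]
--     if cmd == "faultymount" and len(rest) == 3:
--         return global_args + ["create", "--size", rest[1], "--faulty-blocks", rest[2]]
--     if cmd == "faultymountfs" and len(rest) == 3:
--         return global_args + ["create", "--size", rest[1], "--faulty-blocks", rest[2], "--fs"]
--
--     if cmd in {"polymount", "polymountfs"}:
--         extra = ["--fs"] if cmd.endswith("fs") else []
--         if len(rest) == 5 and rest[1] == "rand":
--             return global_args + [
--                 "create",
--                 "--count",
--                 rest[2],
--                 "--min-size",
--                 rest[3],
--                 "--max-size",
--                 rest[4],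
--                 *extra,
--             ]
--         if len(rest) == 3:
--             return global_args + ["create", "--count", rest[1], "--size", rest[2], *extra]
--
--     if cmd in {"custompolymount", "custompolymountfs", "custommount", "custommountfs"}:
--         extra = ["--fs"] if cmd.endswith("fs") else []
--         if len(rest) == 6 and rest[1] == "rand":
--             return global_args + [
--                 "create",
--                 "--base-dir",
--                 rest[2],
--                 "--count",
--                 rest[3],
--                 "--min-size",
--                 rest[4],
--                 "--max-size",
--                 rest[5],
--                 *extra,
--             ]
--         if len(rest) == 4:
--             return global_args + ["create", "--base-dir", rest[1], "--count", rest[2], "--size", rest[3], *extra]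
--
--     if cmd in {"tmpfsmount", "tmpfsmountfs"} and len(rest) == 2:
--         extra = ["--fs"] if cmd.endswith("fs") else []
--         return global_args + ["create", "--backend", "tmpfs", "--size", rest[1], *extra]
--
--     if cmd in {"tmpfspolymount", "tmpfspolymountfs"}:
--         extra = ["--fs"] if cmd.endswith("fs") else []
--         if len(rest) == 5 and rest[1] == "rand":
--             return global_args + [
--                 "create",
--                 "--backend",
--                 "tmpfs",
--                 "--count",
--                 rest[2],
--                 "--min-size",
--                 rest[3],
--                 "--max-size",
--                 rest[4],
--                 *extra,
--             ]
--         if len(rest) == 3: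
--             return global_args + ["create", "--backend", "tmpfs", "--count", rest[1], "--size", rest[2], *extra]
--
--     if len(rest) == 1:
--         return global_args + ["attach", rest[0]]
--
--     return global_args + rest
-- ===== SOURCE B (Python) =====
-- GLOBAL_FLAGS = {"--script", "--keep", "--help", "-h"}
--
-- # Spec table: command -> list of accepted forms (arity, needs_rand, template).
-- # A template token that is an int i means rest[i]; a string is a literal token.
-- # "--fs" is appended exactly when the command name ends in "fs".
-- SPECS = {
--     "automount":        [(2, False, ["create", "--size", 1])],
--     "automountfs":      [(2, False, ["create", "--size", 1])],
--     "faultymount":      [(3, False, ["create", "--size", 1, "--faulty-blocks", 2])],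
--     "faultymountfs":    [(3, False, ["create", "--size", 1, "--faulty-blocks", 2])],
--     "polymount":        [(5, True,  ["create", "--count", 2, "--min-size", 3, "--max-size", 4]),
--                          (3, False, ["create", "--count", 1, "--size", 2])],
--     "polymountfs":      [(5, True,  ["create", "--count", 2, "--min-size", 3, "--max-size", 4]),
--                          (3, False, ["create", "--count", 1, "--size", 2])],
--     "custompolymount":   [(6, True,  ["create", "--base-dir", 2, "--count", 3, "--min-size", 4, "--max-size", 5]),
--                           (4, False, ["create", "--base-dir", 1, "--count", 2, "--size", 3])],
--     "custompolymountfs": [(6, True,  ["create", "--base-dir", 2, "--count", 3, "--min-size", 4, "--max-size", 5]),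
--                           (4, False, ["create", "--base-dir", 1, "--count", 2, "--size", 3])],
--     "custommount":       [(6, True,  ["create", "--base-dir", 2, "--count", 3, "--min-size", 4, "--max-size", 5]),
--                           (4, False, ["create", "--base-dir", 1, "--count", 2, "--size", 3])],
--     "custommountfs":     [(6, True,  ["create", "--base-dir", 2, "--count", 3, "--min-size", 4, "--max-size", 5]),
--                           (4, False, ["create", "--base-dir", 1, "--count", 2, "--size", 3])],
--     "tmpfsmount":       [(2, False, ["create", "--backend", "tmpfs", "--size", 1])],
--     "tmpfsmountfs":     [(2, False, ["create", "--backend", "tmpfs", "--size", 1])],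
--     "tmpfspolymount":   [(5, True,  ["create", "--backend", "tmpfs", "--count", 2, "--min-size", 3, "--max-size", 4]),
--                          (3, False, ["create", "--backend", "tmpfs", "--count", 1, "--size", 2])],
--     "tmpfspolymountfs": [(5, True,  ["create", "--backend", "tmpfs", "--count", 2, "--min-size", 3, "--max-size", 4]),
--                          (3, False, ["create", "--backend", "tmpfs", "--count", 1, "--size", 2])],
-- }
--
--
-- def normalize_legacy_argv(argv: list[str]) -> list[str]:
--     split = next((i for i, tok in enumerate(argv) if tok not in GLOBAL_FLAGS), len(argv))
--     global_args, rest = argv[:split], argv[split:]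
--
--     if not rest:
--         return global_args
--
--     cmd = rest[0]
--     if cmd in {"attach", "create"}:
--         return global_args + rest
--
--     for arity, needs_rand, template in SPECS.get(cmd, []):
--         if len(rest) == arity and (not needs_rand or rest[1] == "rand"):
--             out = [rest[tok] if isinstance(tok, int) else tok for tok in template]
--             if cmd.endswith("fs"):
--                 out.append("--fs")
--             return global_args + out
--
--     if len(rest) == 1:
--         return global_args + ["attach", cmd]
--     return global_args + rest
-- ===== Notes on version B (the rewrite author's own statement) =====
-- stated objective: simpler
-- what changed: Replaces A's 60-line per-command if/elif cascade by a static spec table (command -> accepted arity forms + output template with positional slots and a uniform endswith('fs') rule) materialised by one generic matching loop; global-flag stripping becomes a single split index instead of a pop loop.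
import Mathlib
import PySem

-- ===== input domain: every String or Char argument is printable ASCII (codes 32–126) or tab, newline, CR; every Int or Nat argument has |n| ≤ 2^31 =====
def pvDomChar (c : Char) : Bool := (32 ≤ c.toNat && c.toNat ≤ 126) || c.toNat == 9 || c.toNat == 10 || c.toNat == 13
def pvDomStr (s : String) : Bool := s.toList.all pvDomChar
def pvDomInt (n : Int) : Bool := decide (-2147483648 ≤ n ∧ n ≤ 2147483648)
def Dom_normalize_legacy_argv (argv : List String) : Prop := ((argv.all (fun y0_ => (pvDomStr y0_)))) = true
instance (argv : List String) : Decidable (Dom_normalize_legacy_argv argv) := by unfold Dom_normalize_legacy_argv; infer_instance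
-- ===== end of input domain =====

-- B replaces A's 60-line if/elif cascade by a static spec table (command ↦ accepted
-- arities + output template) materialised by one generic loop; objective: simpler.

-- ===== PORT A =====
-- A's while loop popping global flags off the front (accumulator = global_args).
def pvStripA (ga rest : List String) : List String × List String :=
  match rest with
  | [] => (ga, [])
  | t :: ts =>
      if t = "--script" ∨ t = "--keep" ∨ t = "--help" ∨ t = "-h" then
        pvStripA (ga ++ [t]) ts
      else (ga, t :: ts)

-- A's if-chain after the strip loop (rest[i] is safe in A due to the length guards,
-- so it is ported as List.getD i "" — exact wherever A reads it).
def pvTailA (global_args rest : List String) : List String :=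
  if rest = [] then global_args else
  let cmd := rest.getD 0 ""
  if cmd = "attach" ∨ cmd = "create" then global_args ++ rest else
  if cmd = "automount" ∧ rest.length = 2 then
    global_args ++ ["create", "--size", rest.getD 1 ""] else
  if cmd = "automountfs" ∧ rest.length = 2 then
    global_args ++ ["create", "--size", rest.getD 1 "", "--fs"] else
  if cmd = "faultymount" ∧ rest.length = 3 then
    global_args ++ ["create", "--size", rest.getD 1 "", "--faulty-blocks", rest.getD 2 ""] else
  if cmd = "faultymountfs" ∧ rest.length = 3 then
    global_args ++ ["create", "--size", rest.getD 1 "", "--faulty-blocks", rest.getD 2 "", "--fs"] else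
  if cmd = "polymount" ∨ cmd = "polymountfs" then
    let extra := if PySem.Str.endswith cmd "fs" then ["--fs"] else []
    if rest.length = 5 ∧ rest.getD 1 "" = "rand" then
      global_args ++ ["create", "--count", rest.getD 2 "", "--min-size", rest.getD 3 "",
        "--max-size", rest.getD 4 ""] ++ extra
    else if rest.length = 3 then
      global_args ++ ["create", "--count", rest.getD 1 "", "--size", rest.getD 2 ""] ++ extra
    else pvTailA_fall global_args rest
  else
  if cmd = "custompolymount" ∨ cmd = "custompolymountfs" ∨ cmd = "custommount" ∨ cmd = "custommountfs" then
    let extra := if PySem.Str.endswith cmd "fs" then ["--fs"] else []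
    if rest.length = 6 ∧ rest.getD 1 "" = "rand" then
      global_args ++ ["create", "--base-dir", rest.getD 2 "", "--count", rest.getD 3 "",
        "--min-size", rest.getD 4 "", "--max-size", rest.getD 5 ""] ++ extra
    else if rest.length = 4 then
      global_args ++ ["create", "--base-dir", rest.getD 1 "", "--count", rest.getD 2 "",
        "--size", rest.getD 3 ""] ++ extra
    else pvTailA_fall global_args rest
  else
  if (cmd = "tmpfsmount" ∨ cmd = "tmpfsmountfs") ∧ rest.length = 2 then
    let extra := if PySem.Str.endswith cmd "fs" then ["--fs"] else []
    global_args ++ ["create", "--backend", "tmpfs", "--size", rest.getD 1 ""] ++ extra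
  else
  if cmd = "tmpfspolymount" ∨ cmd = "tmpfspolymountfs" then
    let extra := if PySem.Str.endswith cmd "fs" then ["--fs"] else []
    if rest.length = 5 ∧ rest.getD 1 "" = "rand" then
      global_args ++ ["create", "--backend", "tmpfs", "--count", rest.getD 2 "",
        "--min-size", rest.getD 3 "", "--max-size", rest.getD 4 ""] ++ extra
    else if rest.length = 3 then
      global_args ++ ["create", "--backend", "tmpfs", "--count", rest.getD 1 "",
        "--size", rest.getD 2 ""] ++ extra
    else pvTailA_fall global_args rest
  else pvTailA_fall global_args rest
where
  -- A's final two lines (reached when no earlier branch returned)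
  pvTailA_fall (global_args rest : List String) : List String :=
    if rest.length = 1 then global_args ++ ["attach", rest.getD 0 ""]
    else global_args ++ rest

def normalize_legacy_argv (argv : List String) : List String :=
  if argv = [] then argv else
  let gr := pvStripA [] argv
  pvTailA gr.1 gr.2

-- ===== PORT B =====
-- a template token: a literal, or the positional argument rest[i]
inductive PvTok where
  | lit : String → PvTok
  | arg : Nat → PvTok
deriving DecidableEq, Repr

-- the spec table: command ↦ list of forms (arity, needs "rand" at rest[1], template)
def pvSpecs : List (String × List (Nat × Bool × List PvTok)) :=
  [("automount",        [(2, false, [.lit "create", .lit "--size", .arg 1])]),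
   ("automountfs",      [(2, false, [.lit "create", .lit "--size", .arg 1])]),
   ("faultymount",      [(3, false, [.lit "create", .lit "--size", .arg 1, .lit "--faulty-blocks", .arg 2])]),
   ("faultymountfs",    [(3, false, [.lit "create", .lit "--size", .arg 1, .lit "--faulty-blocks", .arg 2])]),
   ("polymount",        [(5, true,  [.lit "create", .lit "--count", .arg 2, .lit "--min-size", .arg 3, .lit "--max-size", .arg 4]),
                         (3, false, [.lit "create", .lit "--count", .arg 1, .lit "--size", .arg 2])]),
   ("polymountfs",      [(5, true,  [.lit "create", .lit "--count", .arg 2, .lit "--min-size", .arg 3, .lit "--max-size", .arg 4]),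
                         (3, false, [.lit "create", .lit "--count", .arg 1, .lit "--size", .arg 2])]),
   ("custompolymount",  [(6, true,  [.lit "create", .lit "--base-dir", .arg 2, .lit "--count", .arg 3, .lit "--min-size", .arg 4, .lit "--max-size", .arg 5]),
                         (4, false, [.lit "create", .lit "--base-dir", .arg 1, .lit "--count", .arg 2, .lit "--size", .arg 3])]),
   ("custompolymountfs",[(6, true,  [.lit "create", .lit "--base-dir", .arg 2, .lit "--count", .arg 3, .lit "--min-size", .arg 4, .lit "--max-size", .arg 5]),
                         (4, false, [.lit "create", .lit "--base-dir", .arg 1, .lit "--count", .arg 2, .lit "--size", .arg 3])]),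
   ("custommount",      [(6, true,  [.lit "create", .lit "--base-dir", .arg 2, .lit "--count", .arg 3, .lit "--min-size", .arg 4, .lit "--max-size", .arg 5]),
                         (4, false, [.lit "create", .lit "--base-dir", .arg 1, .lit "--count", .arg 2, .lit "--size", .arg 3])]),
   ("custommountfs",    [(6, true,  [.lit "create", .lit "--base-dir", .arg 2, .lit "--count", .arg 3, .lit "--min-size", .arg 4, .lit "--max-size", .arg 5]),
                         (4, false, [.lit "create", .lit "--base-dir", .arg 1, .lit "--count", .arg 2, .lit "--size", .arg 3])]),
   ("tmpfsmount",       [(2, false, [.lit "create", .lit "--backend", .lit "tmpfs", .lit "--size", .arg 1])]),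
   ("tmpfsmountfs",     [(2, false, [.lit "create", .lit "--backend", .lit "tmpfs", .lit "--size", .arg 1])]),
   ("tmpfspolymount",   [(5, true,  [.lit "create", .lit "--backend", .lit "tmpfs", .lit "--count", .arg 2, .lit "--min-size", .arg 3, .lit "--max-size", .arg 4]),
                         (3, false, [.lit "create", .lit "--backend", .lit "tmpfs", .lit "--count", .arg 1, .lit "--size", .arg 2])]),
   ("tmpfspolymountfs", [(5, true,  [.lit "create", .lit "--backend", .lit "tmpfs", .lit "--count", .arg 2, .lit "--min-size", .arg 3, .lit "--max-size", .arg 4]),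
                         (3, false, [.lit "create", .lit "--backend", .lit "tmpfs", .lit "--count", .arg 1, .lit "--size", .arg 2])])]

-- materialise a template ('rest[tok] if isinstance(tok, int) else tok'; the arity
-- guard makes every rest[i] in range, ported as getD)
def pvMat (rest : List String) (tpl : List PvTok) : List String :=
  tpl.map (fun t => match t with | .lit s => s | .arg i => rest.getD i "")

-- B's for-loop over the command's forms
def pvTryForms (rest : List String) : List (Nat × Bool × List PvTok) → Option (List String)
  | [] => none
  | (n, r, tpl) :: fs =>
      if rest.length = n ∧ (r = false ∨ rest.getD 1 "" = "rand") then some (pvMat rest tpl)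
      else pvTryForms rest fs

-- t in GLOBAL_FLAGS
def pvIsFlag (t : String) : Bool :=
  t == "--script" || t == "--keep" || t == "--help" || t == "-h"

-- everything after computing (global_args, rest)
def pvTailB (global_args rest : List String) : List String :=
  if rest = [] then global_args else
  let cmd := rest.getD 0 ""
  if cmd = "attach" ∨ cmd = "create" then global_args ++ rest else
  match pvTryForms rest ((pvSpecs.lookup cmd).getD []) with
  | some out =>
      global_args ++ out ++ (if PySem.Str.endswith cmd "fs" then ["--fs"] else [])
  | none =>
      if rest.length = 1 then global_args ++ ["attach", cmd]
      else global_args ++ rest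

def normalize_legacy_argv_alt (argv : List String) : List String :=
  let split := (argv.findIdx? (fun t => !pvIsFlag t)).getD argv.length
  pvTailB (argv.take split) (argv.drop split)

-- ===== PRECONDITION & SPEC =====
def Spec_normalize_legacy_argv (argv : List String) (out : List String) : Prop := out = normalize_legacy_argv_alt argv
instance (argv : List String) (out : List String) : Decidable (Spec_normalize_legacy_argv argv out) := by unfold Spec_normalize_legacy_argv; infer_instance

-- ===== CLAIM (what is proved, stated in full; the proofs are below) =====
def Claim_equal_normalize_legacy_argv : Prop := ∀ (argv : List String), Dom_normalize_legacy_argv argv → Spec_normalize_legacy_argv argv (normalize_legacy_argv argv)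

-- ===== LEMMAS AND PROOFS =====

theorem pvStripA_eq (rest ga : List String) :
    pvStripA ga rest = (ga ++ rest.takeWhile pvIsFlag, rest.dropWhile pvIsFlag) := by
  induction rest generalizing ga with
  | nil => simp [pvStripA]
  | cons t ts ih =>
      by_cases h : t = "--script" ∨ t = "--keep" ∨ t = "--help" ∨ t = "-h"
      · have hf : pvIsFlag t = true := by
          rcases h with h | h | h | h <;> simp [pvIsFlag, h]
        simp [pvStripA, h, List.takeWhile_cons, List.dropWhile_cons, hf, ih]
      · have hf : pvIsFlag t = false := by
          push Not at h
          simp [pvIsFlag, h.1, h.2.1, h.2.2.1, h.2.2.2]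
        simp [pvStripA, h, hf]

theorem pvSplitB_eq (argv : List String) :
    argv.take (((argv.findIdx? (fun t => !pvIsFlag t)).getD argv.length)) = argv.takeWhile pvIsFlag ∧
    argv.drop (((argv.findIdx? (fun t => !pvIsFlag t)).getD argv.length)) = argv.dropWhile pvIsFlag := by
  induction argv with
  | nil => simp
  | cons t ts ih =>
      by_cases hf : pvIsFlag t
      · have hidx : ((t :: ts).findIdx? (fun x => !pvIsFlag x)).getD (t :: ts).length
            = ((ts.findIdx? (fun x => !pvIsFlag x)).getD ts.length) + 1 := by
          cases h : ts.findIdx? (fun x => !pvIsFlag x) <;>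
            simp [List.findIdx?_cons, hf, h]
        rw [hidx]
        simp [List.takeWhile_cons_of_pos hf, List.dropWhile_cons_of_pos hf, ih.1, ih.2]
      · simp [List.findIdx?_cons, hf]

set_option maxHeartbeats 4000000 in
theorem pvTail_eq (g rest : List String) : pvTailA g rest = pvTailB g rest := by
  cases rest with
  | nil => simp [pvTailA, pvTailB]
  | cons cmd ts =>
    by_cases hA : cmd = "attach"
    · subst hA; rfl
    by_cases hC : cmd = "create"
    · subst hC; rfl
    by_cases h00 : cmd = "automount"
    · subst h00
      have hfs : PySem.Str.endswith "automount" "fs" = false := by decide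
      rcases ts with _ | ⟨a, ts⟩
      · simp only [pvTailA, pvTailA.pvTailA_fall, pvTailB, pvSpecs, pvTryForms, pvMat, List.lookup,
        List.map, List.getD_cons_zero, List.getD_cons_succ, List.length_cons, String.reduceEq,
        reduceCtorEq, beq_iff_eq, beq_self_eq_true, List.cons_ne_nil, or_self, or_false, false_or,
        or_true, true_or, and_true, true_and, false_and, and_false, if_false, if_true, reduceIte,
        not_false_eq_true, Bool.false_eq_true, ite_false, ite_true, hfs]
        split_ifs <;> first | (exfalso; omega) | simp_all [pvTryForms, pvMat]
      · by_cases hr : a = "rand" <;>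
          simp only [pvTailA, pvTailA.pvTailA_fall, pvTailB, pvSpecs, pvTryForms, pvMat, List.lookup,
        List.map, List.getD_cons_zero, List.getD_cons_succ, List.length_cons, String.reduceEq,
        reduceCtorEq, beq_iff_eq, beq_self_eq_true, List.cons_ne_nil, or_self, or_false, false_or,
        or_true, true_or, and_true, true_and, false_and, and_false, if_false, if_true, reduceIte,
        not_false_eq_true, Bool.false_eq_true, ite_false, ite_true, hfs, hr] <;>
          split_ifs <;> first | (exfalso; omega) | simp_all [pvTryForms, pvMat]
    by_cases h01 : cmd = "automountfs"
    · subst h01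
      have hfs : PySem.Str.endswith "automountfs" "fs" = true := by decide
      rcases ts with _ | ⟨a, ts⟩
      · simp only [pvTailA, pvTailA.pvTailA_fall, pvTailB, pvSpecs, pvTryForms, pvMat, List.lookup,
        List.map, List.getD_cons_zero, List.getD_cons_succ, List.length_cons, String.reduceEq,
        reduceCtorEq, beq_iff_eq, beq_self_eq_true, List.cons_ne_nil, or_self, or_false, false_or,
        or_true, true_or, and_true, true_and, false_and, and_false, if_false, if_true, reduceIte,
        not_false_eq_true, Bool.false_eq_true, ite_false, ite_true, hfs]
        split_ifs <;> first | (exfalso; omega) | simp_all [pvTryForms, pvMat]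
      · by_cases hr : a = "rand" <;>
          simp only [pvTailA, pvTailA.pvTailA_fall, pvTailB, pvSpecs, pvTryForms, pvMat, List.lookup,
        List.map, List.getD_cons_zero, List.getD_cons_succ, List.length_cons, String.reduceEq,
        reduceCtorEq, beq_iff_eq, beq_self_eq_true, List.cons_ne_nil, or_self, or_false, false_or,
        or_true, true_or, and_true, true_and, false_and, and_false, if_false, if_true, reduceIte,
        not_false_eq_true, Bool.false_eq_true, ite_false, ite_true, hfs, hr] <;>
          split_ifs <;> first | (exfalso; omega) | simp_all [pvTryForms, pvMat]
    by_cases h02 : cmd = "faultymount"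
    · subst h02
      have hfs : PySem.Str.endswith "faultymount" "fs" = false := by decide
      rcases ts with _ | ⟨a, ts⟩
      · simp only [pvTailA, pvTailA.pvTailA_fall, pvTailB, pvSpecs, pvTryForms, pvMat, List.lookup,
        List.map, List.getD_cons_zero, List.getD_cons_succ, List.length_cons, String.reduceEq,
        reduceCtorEq, beq_iff_eq, beq_self_eq_true, List.cons_ne_nil, or_self, or_false, false_or,
        or_true, true_or, and_true, true_and, false_and, and_false, if_false, if_true, reduceIte,
        not_false_eq_true, Bool.false_eq_true, ite_false, ite_true, hfs]
        split_ifs <;> first | (exfalso; omega) | simp_all [pvTryForms, pvMat]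
      · by_cases hr : a = "rand" <;>
          simp only [pvTailA, pvTailA.pvTailA_fall, pvTailB, pvSpecs, pvTryForms, pvMat, List.lookup,
        List.map, List.getD_cons_zero, List.getD_cons_succ, List.length_cons, String.reduceEq,
        reduceCtorEq, beq_iff_eq, beq_self_eq_true, List.cons_ne_nil, or_self, or_false, false_or,
        or_true, true_or, and_true, true_and, false_and, and_false, if_false, if_true, reduceIte,
        not_false_eq_true, Bool.false_eq_true, ite_false, ite_true, hfs, hr] <;>
          split_ifs <;> first | (exfalso; omega) | simp_all [pvTryForms, pvMat]
    by_cases h03 : cmd = "faultymountfs"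
    · subst h03
      have hfs : PySem.Str.endswith "faultymountfs" "fs" = true := by decide
      rcases ts with _ | ⟨a, ts⟩
      · simp only [pvTailA, pvTailA.pvTailA_fall, pvTailB, pvSpecs, pvTryForms, pvMat, List.lookup,
        List.map, List.getD_cons_zero, List.getD_cons_succ, List.length_cons, String.reduceEq,
        reduceCtorEq, beq_iff_eq, beq_self_eq_true, List.cons_ne_nil, or_self, or_false, false_or,
        or_true, true_or, and_true, true_and, false_and, and_false, if_false, if_true, reduceIte,
        not_false_eq_true, Bool.false_eq_true, ite_false, ite_true, hfs]
        split_ifs <;> first | (exfalso; omega) | simp_all [pvTryForms, pvMat]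
      · by_cases hr : a = "rand" <;>
          simp only [pvTailA, pvTailA.pvTailA_fall, pvTailB, pvSpecs, pvTryForms, pvMat, List.lookup,
        List.map, List.getD_cons_zero, List.getD_cons_succ, List.length_cons, String.reduceEq,
        reduceCtorEq, beq_iff_eq, beq_self_eq_true, List.cons_ne_nil, or_self, or_false, false_or,
        or_true, true_or, and_true, true_and, false_and, and_false, if_false, if_true, reduceIte,
        not_false_eq_true, Bool.false_eq_true, ite_false, ite_true, hfs, hr] <;>
          split_ifs <;> first | (exfalso; omega) | simp_all [pvTryForms, pvMat]
    by_cases h04 : cmd = "polymount"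
    · subst h04
      have hfs : PySem.Str.endswith "polymount" "fs" = false := by decide
      rcases ts with _ | ⟨a, ts⟩
      · simp only [pvTailA, pvTailA.pvTailA_fall, pvTailB, pvSpecs, pvTryForms, pvMat, List.lookup,
        List.map, List.getD_cons_zero, List.getD_cons_succ, List.length_cons, String.reduceEq,
        reduceCtorEq, beq_iff_eq, beq_self_eq_true, List.cons_ne_nil, or_self, or_false, false_or,
        or_true, true_or, and_true, true_and, false_and, and_false, if_false, if_true, reduceIte,
        not_false_eq_true, Bool.false_eq_true, ite_false, ite_true, hfs]
        split_ifs <;> first | (exfalso; omega) | simp_all [pvTryForms, pvMat]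
      · by_cases hr : a = "rand" <;>
          simp only [pvTailA, pvTailA.pvTailA_fall, pvTailB, pvSpecs, pvTryForms, pvMat, List.lookup,
        List.map, List.getD_cons_zero, List.getD_cons_succ, List.length_cons, String.reduceEq,
        reduceCtorEq, beq_iff_eq, beq_self_eq_true, List.cons_ne_nil, or_self, or_false, false_or,
        or_true, true_or, and_true, true_and, false_and, and_false, if_false, if_true, reduceIte,
        not_false_eq_true, Bool.false_eq_true, ite_false, ite_true, hfs, hr] <;>
          split_ifs <;> first | (exfalso; omega) | simp_all [pvTryForms, pvMat]
    by_cases h05 : cmd = "polymountfs"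
    · subst h05
      have hfs : PySem.Str.endswith "polymountfs" "fs" = true := by decide
      rcases ts with _ | ⟨a, ts⟩
      · simp only [pvTailA, pvTailA.pvTailA_fall, pvTailB, pvSpecs, pvTryForms, pvMat, List.lookup,
        List.map, List.getD_cons_zero, List.getD_cons_succ, List.length_cons, String.reduceEq,
        reduceCtorEq, beq_iff_eq, beq_self_eq_true, List.cons_ne_nil, or_self, or_false, false_or,
        or_true, true_or, and_true, true_and, false_and, and_false, if_false, if_true, reduceIte,
        not_false_eq_true, Bool.false_eq_true, ite_false, ite_true, hfs]
        split_ifs <;> first | (exfalso; omega) | simp_all [pvTryForms, pvMat]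
      · by_cases hr : a = "rand" <;>
          simp only [pvTailA, pvTailA.pvTailA_fall, pvTailB, pvSpecs, pvTryForms, pvMat, List.lookup,
        List.map, List.getD_cons_zero, List.getD_cons_succ, List.length_cons, String.reduceEq,
        reduceCtorEq, beq_iff_eq, beq_self_eq_true, List.cons_ne_nil, or_self, or_false, false_or,
        or_true, true_or, and_true, true_and, false_and, and_false, if_false, if_true, reduceIte,
        not_false_eq_true, Bool.false_eq_true, ite_false, ite_true, hfs, hr] <;>
          split_ifs <;> first | (exfalso; omega) | simp_all [pvTryForms, pvMat]
    by_cases h06 : cmd = "custompolymount"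
    · subst h06
      have hfs : PySem.Str.endswith "custompolymount" "fs" = false := by decide
      rcases ts with _ | ⟨a, ts⟩
      · simp only [pvTailA, pvTailA.pvTailA_fall, pvTailB, pvSpecs, pvTryForms, pvMat, List.lookup,
        List.map, List.getD_cons_zero, List.getD_cons_succ, List.length_cons, String.reduceEq,
        reduceCtorEq, beq_iff_eq, beq_self_eq_true, List.cons_ne_nil, or_self, or_false, false_or,
        or_true, true_or, and_true, true_and, false_and, and_false, if_false, if_true, reduceIte,
        not_false_eq_true, Bool.false_eq_true, ite_false, ite_true, hfs]
        split_ifs <;> first | (exfalso; omega) | simp_all [pvTryForms, pvMat]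
      · by_cases hr : a = "rand" <;>
          simp only [pvTailA, pvTailA.pvTailA_fall, pvTailB, pvSpecs, pvTryForms, pvMat, List.lookup,
        List.map, List.getD_cons_zero, List.getD_cons_succ, List.length_cons, String.reduceEq,
        reduceCtorEq, beq_iff_eq, beq_self_eq_true, List.cons_ne_nil, or_self, or_false, false_or,
        or_true, true_or, and_true, true_and, false_and, and_false, if_false, if_true, reduceIte,
        not_false_eq_true, Bool.false_eq_true, ite_false, ite_true, hfs, hr] <;>
          split_ifs <;> first | (exfalso; omega) | simp_all [pvTryForms, pvMat]
    by_cases h07 : cmd = "custompolymountfs"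
    · subst h07
      have hfs : PySem.Str.endswith "custompolymountfs" "fs" = true := by decide
      rcases ts with _ | ⟨a, ts⟩
      · simp only [pvTailA, pvTailA.pvTailA_fall, pvTailB, pvSpecs, pvTryForms, pvMat, List.lookup,
        List.map, List.getD_cons_zero, List.getD_cons_succ, List.length_cons, String.reduceEq,
        reduceCtorEq, beq_iff_eq, beq_self_eq_true, List.cons_ne_nil, or_self, or_false, false_or,
        or_true, true_or, and_true, true_and, false_and, and_false, if_false, if_true, reduceIte,
        not_false_eq_true, Bool.false_eq_true, ite_false, ite_true, hfs]
        split_ifs <;> first | (exfalso; omega) | simp_all [pvTryForms, pvMat]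
      · by_cases hr : a = "rand" <;>
          simp only [pvTailA, pvTailA.pvTailA_fall, pvTailB, pvSpecs, pvTryForms, pvMat, List.lookup,
        List.map, List.getD_cons_zero, List.getD_cons_succ, List.length_cons, String.reduceEq,
        reduceCtorEq, beq_iff_eq, beq_self_eq_true, List.cons_ne_nil, or_self, or_false, false_or,
        or_true, true_or, and_true, true_and, false_and, and_false, if_false, if_true, reduceIte,
        not_false_eq_true, Bool.false_eq_true, ite_false, ite_true, hfs, hr] <;>
          split_ifs <;> first | (exfalso; omega) | simp_all [pvTryForms, pvMat]
    by_cases h08 : cmd = "custommount"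
    · subst h08
      have hfs : PySem.Str.endswith "custommount" "fs" = false := by decide
      rcases ts with _ | ⟨a, ts⟩
      · simp only [pvTailA, pvTailA.pvTailA_fall, pvTailB, pvSpecs, pvTryForms, pvMat, List.lookup,
        List.map, List.getD_cons_zero, List.getD_cons_succ, List.length_cons, String.reduceEq,
        reduceCtorEq, beq_iff_eq, beq_self_eq_true, List.cons_ne_nil, or_self, or_false, false_or,
        or_true, true_or, and_true, true_and, false_and, and_false, if_false, if_true, reduceIte,
        not_false_eq_true, Bool.false_eq_true, ite_false, ite_true, hfs]
        split_ifs <;> first | (exfalso; omega) | simp_all [pvTryForms, pvMat]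
      · by_cases hr : a = "rand" <;>
          simp only [pvTailA, pvTailA.pvTailA_fall, pvTailB, pvSpecs, pvTryForms, pvMat, List.lookup,
        List.map, List.getD_cons_zero, List.getD_cons_succ, List.length_cons, String.reduceEq,
        reduceCtorEq, beq_iff_eq, beq_self_eq_true, List.cons_ne_nil, or_self, or_false, false_or,
        or_true, true_or, and_true, true_and, false_and, and_false, if_false, if_true, reduceIte,
        not_false_eq_true, Bool.false_eq_true, ite_false, ite_true, hfs, hr] <;>
          split_ifs <;> first | (exfalso; omega) | simp_all [pvTryForms, pvMat]
    by_cases h09 : cmd = "custommountfs"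
    · subst h09
      have hfs : PySem.Str.endswith "custommountfs" "fs" = true := by decide
      rcases ts with _ | ⟨a, ts⟩
      · simp only [pvTailA, pvTailA.pvTailA_fall, pvTailB, pvSpecs, pvTryForms, pvMat, List.lookup,
        List.map, List.getD_cons_zero, List.getD_cons_succ, List.length_cons, String.reduceEq,
        reduceCtorEq, beq_iff_eq, beq_self_eq_true, List.cons_ne_nil, or_self, or_false, false_or,
        or_true, true_or, and_true, true_and, false_and, and_false, if_false, if_true, reduceIte,
        not_false_eq_true, Bool.false_eq_true, ite_false, ite_true, hfs]
        split_ifs <;> first | (exfalso; omega) | simp_all [pvTryForms, pvMat]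
      · by_cases hr : a = "rand" <;>
          simp only [pvTailA, pvTailA.pvTailA_fall, pvTailB, pvSpecs, pvTryForms, pvMat, List.lookup,
        List.map, List.getD_cons_zero, List.getD_cons_succ, List.length_cons, String.reduceEq,
        reduceCtorEq, beq_iff_eq, beq_self_eq_true, List.cons_ne_nil, or_self, or_false, false_or,
        or_true, true_or, and_true, true_and, false_and, and_false, if_false, if_true, reduceIte,
        not_false_eq_true, Bool.false_eq_true, ite_false, ite_true, hfs, hr] <;>
          split_ifs <;> first | (exfalso; omega) | simp_all [pvTryForms, pvMat]
    by_cases h10 : cmd = "tmpfsmount"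
    · subst h10
      have hfs : PySem.Str.endswith "tmpfsmount" "fs" = false := by decide
      rcases ts with _ | ⟨a, ts⟩
      · simp only [pvTailA, pvTailA.pvTailA_fall, pvTailB, pvSpecs, pvTryForms, pvMat, List.lookup,
        List.map, List.getD_cons_zero, List.getD_cons_succ, List.length_cons, String.reduceEq,
        reduceCtorEq, beq_iff_eq, beq_self_eq_true, List.cons_ne_nil, or_self, or_false, false_or,
        or_true, true_or, and_true, true_and, false_and, and_false, if_false, if_true, reduceIte,
        not_false_eq_true, Bool.false_eq_true, ite_false, ite_true, hfs]
        split_ifs <;> first | (exfalso; omega) | simp_all [pvTryForms, pvMat]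
      · by_cases hr : a = "rand" <;>
          simp only [pvTailA, pvTailA.pvTailA_fall, pvTailB, pvSpecs, pvTryForms, pvMat, List.lookup,
        List.map, List.getD_cons_zero, List.getD_cons_succ, List.length_cons, String.reduceEq,
        reduceCtorEq, beq_iff_eq, beq_self_eq_true, List.cons_ne_nil, or_self, or_false, false_or,
        or_true, true_or, and_true, true_and, false_and, and_false, if_false, if_true, reduceIte,
        not_false_eq_true, Bool.false_eq_true, ite_false, ite_true, hfs, hr] <;>
          split_ifs <;> first | (exfalso; omega) | simp_all [pvTryForms, pvMat]
    by_cases h11 : cmd = "tmpfsmountfs"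
    · subst h11
      have hfs : PySem.Str.endswith "tmpfsmountfs" "fs" = true := by decide
      rcases ts with _ | ⟨a, ts⟩
      · simp only [pvTailA, pvTailA.pvTailA_fall, pvTailB, pvSpecs, pvTryForms, pvMat, List.lookup,
        List.map, List.getD_cons_zero, List.getD_cons_succ, List.length_cons, String.reduceEq,
        reduceCtorEq, beq_iff_eq, beq_self_eq_true, List.cons_ne_nil, or_self, or_false, false_or,
        or_true, true_or, and_true, true_and, false_and, and_false, if_false, if_true, reduceIte,
        not_false_eq_true, Bool.false_eq_true, ite_false, ite_true, hfs]
        split_ifs <;> first | (exfalso; omega) | simp_all [pvTryForms, pvMat]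
      · by_cases hr : a = "rand" <;>
          simp only [pvTailA, pvTailA.pvTailA_fall, pvTailB, pvSpecs, pvTryForms, pvMat, List.lookup,
        List.map, List.getD_cons_zero, List.getD_cons_succ, List.length_cons, String.reduceEq,
        reduceCtorEq, beq_iff_eq, beq_self_eq_true, List.cons_ne_nil, or_self, or_false, false_or,
        or_true, true_or, and_true, true_and, false_and, and_false, if_false, if_true, reduceIte,
        not_false_eq_true, Bool.false_eq_true, ite_false, ite_true, hfs, hr] <;>
          split_ifs <;> first | (exfalso; omega) | simp_all [pvTryForms, pvMat]
    by_cases h12 : cmd = "tmpfspolymount"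
    · subst h12
      have hfs : PySem.Str.endswith "tmpfspolymount" "fs" = false := by decide
      rcases ts with _ | ⟨a, ts⟩
      · simp only [pvTailA, pvTailA.pvTailA_fall, pvTailB, pvSpecs, pvTryForms, pvMat, List.lookup,
        List.map, List.getD_cons_zero, List.getD_cons_succ, List.length_cons, String.reduceEq,
        reduceCtorEq, beq_iff_eq, beq_self_eq_true, List.cons_ne_nil, or_self, or_false, false_or,
        or_true, true_or, and_true, true_and, false_and, and_false, if_false, if_true, reduceIte,
        not_false_eq_true, Bool.false_eq_true, ite_false, ite_true, hfs]
        split_ifs <;> first | (exfalso; omega) | simp_all [pvTryForms, pvMat]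
      · by_cases hr : a = "rand" <;>
          simp only [pvTailA, pvTailA.pvTailA_fall, pvTailB, pvSpecs, pvTryForms, pvMat, List.lookup,
        List.map, List.getD_cons_zero, List.getD_cons_succ, List.length_cons, String.reduceEq,
        reduceCtorEq, beq_iff_eq, beq_self_eq_true, List.cons_ne_nil, or_self, or_false, false_or,
        or_true, true_or, and_true, true_and, false_and, and_false, if_false, if_true, reduceIte,
        not_false_eq_true, Bool.false_eq_true, ite_false, ite_true, hfs, hr] <;>
          split_ifs <;> first | (exfalso; omega) | simp_all [pvTryForms, pvMat]
    by_cases h13 : cmd = "tmpfspolymountfs"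
    · subst h13
      have hfs : PySem.Str.endswith "tmpfspolymountfs" "fs" = true := by decide
      rcases ts with _ | ⟨a, ts⟩
      · simp only [pvTailA, pvTailA.pvTailA_fall, pvTailB, pvSpecs, pvTryForms, pvMat, List.lookup,
        List.map, List.getD_cons_zero, List.getD_cons_succ, List.length_cons, String.reduceEq,
        reduceCtorEq, beq_iff_eq, beq_self_eq_true, List.cons_ne_nil, or_self, or_false, false_or,
        or_true, true_or, and_true, true_and, false_and, and_false, if_false, if_true, reduceIte,
        not_false_eq_true, Bool.false_eq_true, ite_false, ite_true, hfs]
        split_ifs <;> first | (exfalso; omega) | simp_all [pvTryForms, pvMat]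
      · by_cases hr : a = "rand" <;>
          simp only [pvTailA, pvTailA.pvTailA_fall, pvTailB, pvSpecs, pvTryForms, pvMat, List.lookup,
        List.map, List.getD_cons_zero, List.getD_cons_succ, List.length_cons, String.reduceEq,
        reduceCtorEq, beq_iff_eq, beq_self_eq_true, List.cons_ne_nil, or_self, or_false, false_or,
        or_true, true_or, and_true, true_and, false_and, and_false, if_false, if_true, reduceIte,
        not_false_eq_true, Bool.false_eq_true, ite_false, ite_true, hfs, hr] <;>
          split_ifs <;> first | (exfalso; omega) | simp_all [pvTryForms, pvMat]
    have b00 : (cmd == "automount") = false := beq_eq_false_iff_ne.mpr h00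
    have b01 : (cmd == "automountfs") = false := beq_eq_false_iff_ne.mpr h01
    have b02 : (cmd == "faultymount") = false := beq_eq_false_iff_ne.mpr h02
    have b03 : (cmd == "faultymountfs") = false := beq_eq_false_iff_ne.mpr h03
    have b04 : (cmd == "polymount") = false := beq_eq_false_iff_ne.mpr h04
    have b05 : (cmd == "polymountfs") = false := beq_eq_false_iff_ne.mpr h05
    have b06 : (cmd == "custompolymount") = false := beq_eq_false_iff_ne.mpr h06
    have b07 : (cmd == "custompolymountfs") = false := beq_eq_false_iff_ne.mpr h07
    have b08 : (cmd == "custommount") = false := beq_eq_false_iff_ne.mpr h08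
    have b09 : (cmd == "custommountfs") = false := beq_eq_false_iff_ne.mpr h09
    have b10 : (cmd == "tmpfsmount") = false := beq_eq_false_iff_ne.mpr h10
    have b11 : (cmd == "tmpfsmountfs") = false := beq_eq_false_iff_ne.mpr h11
    have b12 : (cmd == "tmpfspolymount") = false := beq_eq_false_iff_ne.mpr h12
    have b13 : (cmd == "tmpfspolymountfs") = false := beq_eq_false_iff_ne.mpr h13
    simp only [pvTailA, pvTailA.pvTailA_fall, pvTailB, pvSpecs, pvTryForms, pvMat, List.lookup,
        List.map, List.getD_cons_zero, List.getD_cons_succ, List.length_cons, String.reduceEq,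
        reduceCtorEq, beq_iff_eq, beq_self_eq_true, List.cons_ne_nil, or_self, or_false, false_or,
        or_true, true_or, and_true, true_and, false_and, and_false, if_false, if_true, reduceIte,
        not_false_eq_true, Bool.false_eq_true, ite_false, ite_true, b00, b01, b02, b03, b04, b05, b06, b07, b08, b09, b10, b11, b12, b13, hA, hC, h00, h01, h02, h03, h04, h05, h06, h07, h08, h09, h10, h11, h12, h13]
    split_ifs <;> first | (exfalso; omega) | simp_all [pvTryForms, pvMat]

-- ===== VERDICT (by name: the statement is the Claim_ definition above) =====
theorem normalize_legacy_argv_spec : Claim_equal_normalize_legacy_argv := by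
  intro argv _
  unfold Spec_normalize_legacy_argv normalize_legacy_argv normalize_legacy_argv_alt
  rcases pvSplitB_eq argv with ⟨h1, h2⟩
  by_cases he : argv = []
  · subst he; simp [pvTailB]
  · simp only [he, if_false, pvStripA_eq, List.nil_append, h1, h2]
    exact pvTail_eq _ _
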